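-- pv_equiv track=rewrite | github.com/annacasass/AB | P4/pre/blast/sol_blast4.py | build_db_index
-- ===== SOURCE A (Python) =====
-- def build_db_index(database, k):
--     """
--     Preprocess the database into a k-mer index.
--
--     Returns a dict:
--         { db_kmer: [(db_index, db_pos), ...], ... }
--
--     """
--     index = {}
--     for db_index, db_kmer in enumerate(database):
--         for db_pos in range(len(db_kmer) - k + 1):
--             db_word = db_kmer[db_pos : db_pos + k]
--             if db_word not in index:
--                 index[db_word] = []
--             index[db_word].append((db_index, db_pos))
--     return dict(sorted(index.items()))
-- ===== SOURCE B (Python) =====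
-- def build_db_index(database, k):
--     """Same index, built without a dict: collect the sorted distinct k-mers,
--     then emit each word with a per-word sweep over the database."""
--     words = sorted({s[p : p + k]
--                     for s in database
--                     for p in range(len(s) - k + 1)})
--     return {w: [(i, p)
--                 for i, s in enumerate(database)
--                 for p in range(len(s) - k + 1)
--                 if s[p : p + k] == w]
--             for w in words}
-- ===== Notes on version B (the rewrite author's own statement) =====
-- stated objective: simpler
-- what changed: Replaces A's incrementally-updated dict plus final item sort with a dict-free pipeline: one flat list of (word, (index, pos)) pairs, a sort of the distinct words, and a per-word filter of the flat list.
import Mathlib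
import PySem

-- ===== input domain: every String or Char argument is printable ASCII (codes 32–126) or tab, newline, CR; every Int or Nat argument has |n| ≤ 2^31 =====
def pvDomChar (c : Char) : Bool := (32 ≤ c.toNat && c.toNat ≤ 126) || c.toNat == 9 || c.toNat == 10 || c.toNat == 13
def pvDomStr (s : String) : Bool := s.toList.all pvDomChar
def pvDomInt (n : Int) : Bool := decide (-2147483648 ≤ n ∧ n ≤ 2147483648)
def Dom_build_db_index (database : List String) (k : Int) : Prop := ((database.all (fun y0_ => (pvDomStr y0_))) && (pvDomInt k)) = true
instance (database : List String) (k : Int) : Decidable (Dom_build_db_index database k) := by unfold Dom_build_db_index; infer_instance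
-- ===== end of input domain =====

-- ===== PORT A =====
-- B builds the same index without a dict: sorted distinct k-mers, then a per-word sweep; objective: simpler.

-- one k-mer step of A's inner loop body: conditional fresh insert, then append
def pvStepA (d : PySem.Dict String (List (Int × Int))) (g : String × (Int × Int)) :
    PySem.Dict String (List (Int × Int)) :=
  let d1 := if d.contains g.1 then d else d.insert g.1 []
  d1.modify g.1 [] (fun l => l ++ [g.2])

def build_db_index (database : List String) (k : Int) : List (String × List (Int × Int)) :=
  -- dict keys are distinct, so Python's tuple sort in 'sorted(index.items())' never
  -- compares the list components: it is a sort by the key string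
  PySem.List.sorted
    ((PySem.List.enumerate database 0).foldl (fun d ip =>
      (PySem.List.pyRange 0 (PySem.Str.len ip.2 - k + 1) 1).foldl (fun d p =>
        pvStepA d (PySem.Str.slice ip.2 (some p) (some (p + k)), (ip.1, p))) d)
      PySem.Dict.empty).items
    (fun pr => pr.1) false

-- ===== PORT B =====
def build_db_index_alt (database : List String) (k : Int) : List (String × List (Int × Int)) :=
  -- 'words = sorted({s[p:p+k] for s in database for p in range(len(s)-k+1)})'
  (PySem.List.sorted
      (PySem.Set.ofList (database.flatMap (fun s =>
        (PySem.List.pyRange 0 (PySem.Str.len s - k + 1) 1).map (fun p =>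
          PySem.Str.slice s (some p) (some (p + k))))))
      (fun w => w) false).map
    -- '{w: [(i, p) for i, s in enumerate(database) for p in range(len(s)-k+1) if s[p:p+k] == w] for w in words}'
    (fun w => (w, (PySem.List.enumerate database 0).flatMap (fun ip =>
      (PySem.List.pyRange 0 (PySem.Str.len ip.2 - k + 1) 1).flatMap (fun p =>
        if PySem.Str.slice ip.2 (some p) (some (p + k)) == w then [(ip.1, p)] else []))))

-- ===== PRECONDITION & SPEC =====
def Spec_build_db_index (database : List String) (k : Int) (out : List (String × List (Int × Int))) : Prop := out = build_db_index_alt database k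
instance (database : List String) (k : Int) (out : List (String × List (Int × Int))) : Decidable (Spec_build_db_index database k out) := by unfold Spec_build_db_index; infer_instance

-- ===== CLAIM (what is proved, stated in full; the proofs are below) =====
def Claim_equal_build_db_index : Prop := ∀ (database : List String) (k : Int), Dom_build_db_index database k → Spec_build_db_index database k (build_db_index database k)

-- ===== LEMMAS AND PROOFS =====

-- proof-only view: the flat (word, (index, pos)) list both loops traverse
def pvGrams (database : List String) (k : Int) : List (String × (Int × Int)) :=
  (PySem.List.enumerate database 0).flatMap (fun ip =>
    (PySem.List.pyRange 0 (PySem.Str.len ip.2 - k + 1) 1).map (fun p =>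
      (PySem.Str.slice ip.2 (some p) (some (p + k)), (ip.1, p))))

-- 'keep h a when p a' comprehension = filter-then-map
theorem pvFlatMap_if {α β : Type} (l : List α) (p : α → Bool) (h : α → β) :
    l.flatMap (fun a => if p a then [h a] else []) = (l.filter p).map h := by
  induction l with
  | nil => rfl
  | cons a t ih => by_cases hp : p a <;> simp [hp, ih]

-- the word multiset B's set comprehension ranges over is the key column of pvGrams
theorem pvWords_eq (database : List String) (k : Int) :
    database.flatMap (fun s =>
        (PySem.List.pyRange 0 (PySem.Str.len s - k + 1) 1).map (fun p =>
          PySem.Str.slice s (some p) (some (p + k))))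
      = (pvGrams database k).map (fun g => g.1) := by
  unfold pvGrams
  rw [List.map_flatMap]
  conv_lhs => rw [← PySem.List.map_snd_enumerate database 0]
  rw [List.flatMap_map]
  simp [Function.comp_def]

-- B's per-word sweep is the filtered value column of pvGrams
theorem pvOcc_eq (database : List String) (k : Int) (w : String) :
    (PySem.List.enumerate database 0).flatMap (fun ip =>
        (PySem.List.pyRange 0 (PySem.Str.len ip.2 - k + 1) 1).flatMap (fun p =>
          if PySem.Str.slice ip.2 (some p) (some (p + k)) == w then [(ip.1, p)] else []))
      = ((pvGrams database k).filter (fun g => g.1 == w)).map (fun g => g.2) := by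
  unfold pvGrams
  rw [List.filter_flatMap, List.map_flatMap]
  simp only [pvFlatMap_if, List.filter_map, List.map_map]
  rfl

-- pvStepA's effect on one lookup
theorem pvGetD_stepA (d : PySem.Dict String (List (Int × Int))) (g : String × (Int × Int)) (w : String) :
    (pvStepA d g).getD w [] = if w = g.1 then d.getD g.1 [] ++ [g.2] else d.getD w [] := by
  unfold pvStepA
  by_cases hc : d.contains g.1
  · simp [hc, PySem.Dict.getD_modify]
  · simp only [Bool.not_eq_true] at hc
    rw [if_neg (by simp [hc]), PySem.Dict.getD_modify]
    by_cases hw : w = g.1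
    · simp [hw, PySem.Dict.getD_of_not_contains d [] hc]
    · simp [hw, PySem.Dict.getD_insert]

-- getD invariant of A's dict loop
theorem pvGetD_foldA (l : List (String × (Int × Int))) (d : PySem.Dict String (List (Int × Int))) (w : String) :
    (l.foldl pvStepA d).getD w [] = d.getD w [] ++ (l.filter (fun g => g.1 == w)).map (fun g => g.2) := by
  induction l generalizing d with
  | nil => simp
  | cons g t ih =>
    simp only [List.foldl_cons, ih, List.filter_cons, pvGetD_stepA]
    by_cases hw : w = g.1
    · simp [hw]
    · simp [hw, Ne.symm hw]

-- pvStepA's effect on the key list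
theorem pvKeys_stepA (d : PySem.Dict String (List (Int × Int))) (g : String × (Int × Int)) :
    (pvStepA d g).keys = PySem.Set.add d.keys g.1 := by
  unfold pvStepA
  by_cases hc : d.contains g.1
  · rw [if_pos hc, PySem.Dict.keys_modify, PySem.Dict.keys_insert_of_contains d _ hc,
      PySem.Set.add_of_mem ((PySem.Dict.contains_iff_mem_keys d g.1).mp hc)]
  · simp only [Bool.not_eq_true] at hc
    rw [if_neg (by simp [hc]), PySem.Dict.keys_modify,
      PySem.Dict.keys_insert_of_contains _ _ (PySem.Dict.contains_insert_self d g.1 []),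
      PySem.Dict.keys_insert_of_not_contains d _ hc,
      PySem.Set.add_of_not_mem (fun h => by
        simp [(PySem.Dict.contains_iff_mem_keys d g.1).mpr h] at hc)]

-- keys invariant of A's dict loop
theorem pvKeys_foldA (l : List (String × (Int × Int))) (d : PySem.Dict String (List (Int × Int))) :
    (l.foldl pvStepA d).keys = PySem.Set.update d.keys (l.map (fun g => g.1)) := by
  induction l generalizing d with
  | nil => simp [PySem.Set.update]
  | cons g t ih =>
    simp only [List.foldl_cons, List.map_cons, ih, pvKeys_stepA]
    rfl

-- A's nested loop is B's flat gram list folded through the same step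
theorem pvFoldA_eq (database : List String) (k : Int) :
    (PySem.List.enumerate database 0).foldl (fun d ip =>
      (PySem.List.pyRange 0 (PySem.Str.len ip.2 - k + 1) 1).foldl (fun d p =>
        pvStepA d (PySem.Str.slice ip.2 (some p) (some (p + k)), (ip.1, p))) d)
      PySem.Dict.empty = (pvGrams database k).foldl pvStepA PySem.Dict.empty := by
  unfold pvGrams
  rw [List.foldl_flatMap]
  simp [List.foldl_map]

-- ===== VERDICT (by name: the statement is the Claim_ definition above) =====
theorem build_db_index_spec : Claim_equal_build_db_index := by
  intro database k _
  unfold Spec_build_db_index build_db_index build_db_index_alt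
  rw [pvFoldA_eq, pvWords_eq]
  have hkeys : ((pvGrams database k).foldl pvStepA PySem.Dict.empty).keys
      = PySem.Set.ofList ((pvGrams database k).map (fun g => g.1)) := by
    rw [pvKeys_foldA]
    simp [PySem.Set.update_nil_left, PySem.Dict.keys_empty]
  have hnd : ((pvGrams database k).foldl pvStepA PySem.Dict.empty).keys.Nodup := by
    rw [hkeys]; exact PySem.Set.nodup_ofList _
  rw [PySem.Dict.items_eq_map_keys _ hnd ([] : List (Int × Int)), hkeys]
  have hfun : (fun w => (w, ((pvGrams database k).foldl pvStepA PySem.Dict.empty).getD w []))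
      = (fun w => (w, (PySem.List.enumerate database 0).flatMap (fun ip =>
          (PySem.List.pyRange 0 (PySem.Str.len ip.2 - k + 1) 1).flatMap (fun p =>
            if PySem.Str.slice ip.2 (some p) (some (p + k)) == w then [(ip.1, p)] else [])))) := by
    funext w
    rw [pvGetD_foldA, PySem.Dict.getD_empty, pvOcc_eq]
    simp
  rw [hfun]
  apply PySem.List.sorted_eq_of_perm_of_pairwise_lt
  · exact List.Perm.map _ (PySem.List.sorted_perm _ _ _)
  · exact List.Pairwise.map _ (fun a b h => h)
      (PySem.List.sorted_ofList_pairwise_lt ((pvGrams database k).map (fun g => g.1)))
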